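-- pv_equiv track=rewrite | github.com/Ishapatil010204/Drug-target-binding | src/app.py | smiles_to_features
-- ===== SOURCE A (Python) =====
-- def smiles_to_features(smiles):
--     """Convert SMILES to 17 numerical features"""
--     features = []
--     features.append(len(smiles)) # Length
--     features.append(smiles.count('C')) # Carbons
--     features.append(smiles.count('O')) # Oxygens
--     features.append(smiles.count('N')) # Nitrogens
--     features.append(smiles.count('S')) # Sulfurs
--     features.append(smiles.count('P')) # Phosphorus
--     features.append(smiles.count('=')) # Double bonds
--     features.append(smiles.count('#')) # Triple bonds
--     features.append(smiles.count('(')) # Branches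
--     features.append(smiles.count('[')) # Atoms in brackets
--     features.append(smiles.count('@')) # Chirality
--
--     for i in range(1, 7):
--         features.append(smiles.count(str(i)))
--
--     return features
-- ===== SOURCE B (Python) =====
-- def smiles_to_features(smiles):
--     """Convert SMILES to 17 numerical features.
--     Single pass: each character contributes a 17-dim one-hot vector
--     (slot 0 = length, slots 1..16 = the tracked symbols), and the
--     feature vector is the elementwise sum of those contributions."""
--     symbols = "CONSP=#([@123456"
--     feats = [0] * 17
--     for ch in smiles:
--         onehot = [1] + [1 if ch == s else 0 for s in symbols]
--         feats = [a + b for a, b in zip(feats, onehot)]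
--     return feats
-- ===== Notes on version B (the rewrite author's own statement) =====
-- stated objective: alternative
-- what changed: Replaces A's 17 independent str.count scans with a single left-to-right pass that sums, elementwise, a 17-dimensional one-hot contribution vector per character (slot 0 always 1 for the length, slots 1..16 one-hot over the tracked symbols).
import Mathlib
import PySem

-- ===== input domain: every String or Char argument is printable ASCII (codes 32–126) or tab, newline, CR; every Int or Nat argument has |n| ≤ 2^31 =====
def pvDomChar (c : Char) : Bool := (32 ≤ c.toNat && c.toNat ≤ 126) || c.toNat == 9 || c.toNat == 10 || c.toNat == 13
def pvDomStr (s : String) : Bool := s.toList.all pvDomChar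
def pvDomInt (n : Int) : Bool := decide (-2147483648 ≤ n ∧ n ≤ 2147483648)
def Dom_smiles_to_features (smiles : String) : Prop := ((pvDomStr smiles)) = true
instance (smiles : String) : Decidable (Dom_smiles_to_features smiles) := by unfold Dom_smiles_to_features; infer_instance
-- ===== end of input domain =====

-- B replaces A's 17 separate str.count scans by one pass summing per-character
-- 17-dim one-hot contribution vectors (alternative decomposition, same cost).


-- ===== PORT A =====
def smiles_to_features (smiles : String) : List Int :=
  let features : List Int := []
  let features := features ++ [(PySem.Str.len smiles : Int)]       -- Length
  let features := features ++ [(PySem.Str.count smiles "C" : Int)] -- Carbons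
  let features := features ++ [(PySem.Str.count smiles "O" : Int)] -- Oxygens
  let features := features ++ [(PySem.Str.count smiles "N" : Int)] -- Nitrogens
  let features := features ++ [(PySem.Str.count smiles "S" : Int)] -- Sulfurs
  let features := features ++ [(PySem.Str.count smiles "P" : Int)] -- Phosphorus
  let features := features ++ [(PySem.Str.count smiles "=" : Int)] -- Double bonds
  let features := features ++ [(PySem.Str.count smiles "#" : Int)] -- Triple bonds
  let features := features ++ [(PySem.Str.count smiles "(" : Int)] -- Branches
  let features := features ++ [(PySem.Str.count smiles "[" : Int)] -- Atoms in brackets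
  let features := features ++ [(PySem.Str.count smiles "@" : Int)] -- Chirality
  (PySem.List.pyRange 1 7 1).foldl
    (fun fs i => fs ++ [(PySem.Str.count smiles (PySem.Int.toStr i) : Int)]) features

-- ===== PORT B =====
-- one-hot contribution vector of a single character
def pvOneHot (ch : Char) : List Int :=
  1 :: (['C','O','N','S','P','=','#','(','[','@','1','2','3','4','5','6'].map
          (fun s => if ch = s then (1 : Int) else 0))

def smiles_to_features_alt (smiles : String) : List Int :=
  smiles.toList.foldl
    (fun feats ch => (feats.zip (pvOneHot ch)).map (fun p => p.1 + p.2))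
    (List.replicate 17 0)

-- ===== PRECONDITION & SPEC =====
def Spec_smiles_to_features (smiles : String) (out : List Int) : Prop := out = smiles_to_features_alt smiles
instance (smiles : String) (out : List Int) : Decidable (Spec_smiles_to_features smiles out) := by unfold Spec_smiles_to_features; infer_instance

-- ===== CLAIM =====
def Claim_equal_smiles_to_features : Prop := ∀ (smiles : String), Dom_smiles_to_features smiles → Spec_smiles_to_features smiles (smiles_to_features smiles)

-- ===== LEMMAS AND PROOFS =====

-- For a single-character pattern, Python's str.count is plain character counting.
theorem count_go_singleton (c : Char) : ∀ (l : List Char) (acc : Nat),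
    PySem.Chars.count.go [c] l.length l acc = acc + l.count c := by
  intro l
  induction l with
  | nil => intro acc; simp [PySem.Chars.count.go]
  | cons h t ih =>
    intro acc
    by_cases hc : c = h
    · subst hc
      simp [PySem.Chars.count.go, List.isPrefixOf, ih]
      omega
    · simp [PySem.Chars.count.go, List.isPrefixOf, hc, ih, Ne.symm hc]

theorem count_singleton (s : List Char) (c : Char) :
    PySem.Chars.count s [c] = s.count c := by
  simp [PySem.Chars.count, count_go_singleton]

theorem str_count_char (s : String) (c : Char) :
    PySem.Str.count s (String.ofList [c]) = s.toList.count c := by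
  rw [PySem.Str.count_eq]; simp [count_singleton]

-- The fold of one-hot vectors, characterised slot by slot.
theorem onehot_fold (l : List Char) :
    ∀ a0 a1 a2 a3 a4 a5 a6 a7 a8 a9 a10 a11 a12 a13 a14 a15 a16 : Int,
    l.foldl (fun feats ch => (feats.zip (pvOneHot ch)).map (fun p => p.1 + p.2))
      [a0,a1,a2,a3,a4,a5,a6,a7,a8,a9,a10,a11,a12,a13,a14,a15,a16]
    = [a0 + l.length, a1 + l.count 'C', a2 + l.count 'O', a3 + l.count 'N',
       a4 + l.count 'S', a5 + l.count 'P', a6 + l.count '=', a7 + l.count '#',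
       a8 + l.count '(', a9 + l.count '[', a10 + l.count '@', a11 + l.count '1',
       a12 + l.count '2', a13 + l.count '3', a14 + l.count '4', a15 + l.count '5',
       a16 + l.count '6'] := by
  induction l with
  | nil => intros; simp
  | cons h t ih =>
    intros
    rw [List.foldl_cons]
    have hstep : ∀ b0 b1 b2 b3 b4 b5 b6 b7 b8 b9 b10 b11 b12 b13 b14 b15 b16 : Int,
        (([b0,b1,b2,b3,b4,b5,b6,b7,b8,b9,b10,b11,b12,b13,b14,b15,b16].zip
            (pvOneHot h)).map (fun p => p.1 + p.2))
        = [b0 + 1, b1 + ite (h = 'C') 1 0, b2 + ite (h = 'O') 1 0,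
           b3 + ite (h = 'N') 1 0, b4 + ite (h = 'S') 1 0, b5 + ite (h = 'P') 1 0,
           b6 + ite (h = '=') 1 0, b7 + ite (h = '#') 1 0, b8 + ite (h = '(') 1 0,
           b9 + ite (h = '[') 1 0, b10 + ite (h = '@') 1 0, b11 + ite (h = '1') 1 0,
           b12 + ite (h = '2') 1 0, b13 + ite (h = '3') 1 0, b14 + ite (h = '4') 1 0,
           b15 + ite (h = '5') 1 0, b16 + ite (h = '6') 1 0] := by
      intros; simp [pvOneHot]
    rw [hstep, ih]
    simp only [List.count_cons, List.length_cons, beq_iff_eq, List.cons.injEq]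
    refine ⟨?_,?_,?_,?_,?_,?_,?_,?_,?_,?_,?_,?_,?_,?_,?_,?_,?_,trivial⟩ <;>
      push_cast <;> ring

-- ===== VERDICT =====
theorem smiles_to_features_spec : Claim_equal_smiles_to_features := by
  intro smiles _
  unfold Spec_smiles_to_features smiles_to_features smiles_to_features_alt
  have hr : PySem.List.pyRange 1 7 1 = [1, 2, 3, 4, 5, 6] := by decide
  have hrep : (List.replicate 17 (0:Int))
      = [0,0,0,0,0,0,0,0,0,0,0,0,0,0,0,0,0] := by decide
  simp only [hr, hrep, List.foldl, onehot_fold]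
  have hc : ∀ c : Char, (PySem.Str.count smiles (String.ofList [c]) : Int)
      = (smiles.toList.count c : Int) := fun c => by rw [str_count_char]
  simp only [show ("C" : String) = String.ofList ['C'] from rfl,
    show ("O" : String) = String.ofList ['O'] from rfl,
    show ("N" : String) = String.ofList ['N'] from rfl,
    show ("S" : String) = String.ofList ['S'] from rfl,
    show ("P" : String) = String.ofList ['P'] from rfl,
    show ("=" : String) = String.ofList ['='] from rfl,
    show ("#" : String) = String.ofList ['#'] from rfl,
    show ("(" : String) = String.ofList ['('] from rfl,
    show ("[" : String) = String.ofList ['['] from rfl,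
    show ("@" : String) = String.ofList ['@'] from rfl,
    show PySem.Int.toStr 1 = String.ofList ['1'] from rfl,
    show PySem.Int.toStr 2 = String.ofList ['2'] from rfl,
    show PySem.Int.toStr 3 = String.ofList ['3'] from rfl,
    show PySem.Int.toStr 4 = String.ofList ['4'] from rfl,
    show PySem.Int.toStr 5 = String.ofList ['5'] from rfl,
    show PySem.Int.toStr 6 = String.ofList ['6'] from rfl,
    hc, PySem.Str.len_eq]
  simp [String.length_toList]
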